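-- pv_equiv track=rewrite | github.com/GAMaksim/AItasks | lesson14/main.py | ner_analyze
-- ===== SOURCE A (Python) =====
-- persons = ["Ali", "Elon", "Musk", "Putin", "Trump", "Biden", "Steve", "Jobs",
--            "Zilola", "Sardor", "Bahrom", "Mirobidjon", "Karimov", "Mirziyoyev"]
--
-- locations = ["Toshkent", "Samarqand", "Buxoro", "London", "New York", "Tokyo",
--              "Moscow", "Berlin", "Paris", "Uzbekistan", "America", "Japan", "O'zbekiston"]
--
-- organizations = ["Google", "Apple", "Tesla", "Microsoft", "Samsung", "OpenAI",
--                  "Facebook", "Meta", "Amazon", "NASA", "UN", "FIFA"]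
--
-- def ner_analyze(text):
--     words = text.split()
--     entities = []
--     for word in words:
--         clean = word.strip(".,!?;:'\"()[]")
--         if clean in persons:
--             entities.append((clean, "SHAXS"))
--         elif clean in locations:
--             entities.append((clean, "JOY"))
--         elif clean in organizations:
--             entities.append((clean, "TASHKILOT"))
--     return entities
-- ===== SOURCE B (Python) =====
-- persons = ["Ali", "Elon", "Musk", "Putin", "Trump", "Biden", "Steve", "Jobs",
--            "Zilola", "Sardor", "Bahrom", "Mirobidjon", "Karimov", "Mirziyoyev"]
--
-- locations = ["Toshkent", "Samarqand", "Buxoro", "London", "New York", "Tokyo",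
--              "Moscow", "Berlin", "Paris", "Uzbekistan", "America", "Japan", "O'zbekiston"]
--
-- organizations = ["Google", "Apple", "Tesla", "Microsoft", "Samsung", "OpenAI",
--                  "Facebook", "Meta", "Amazon", "NASA", "UN", "FIFA"]
--
--
-- def ner_analyze(text):
--     # staged passes: clean all words once, then one full marking pass per
--     # category over a tag array, lowest priority first so a later category
--     # overwrites (persons > locations > organizations), then filter.
--     cleans = [w.strip(".,!?;:'\"()[]") for w in text.split()]
--     tags = [None] * len(cleans)
--     for names, tag in ((organizations, "TASHKILOT"),
--                        (locations, "JOY"),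
--                        (persons, "SHAXS")):
--         name_set = set(names)
--         for i, c in enumerate(cleans):
--             if c in name_set:
--                 tags[i] = tag
--     return [(c, t) for c, t in zip(cleans, tags) if t is not None]
-- ===== Notes on version B (the rewrite author's own statement) =====
-- stated objective: alternative
-- what changed: Replaces A's single pass with a per-word three-way elif membership chain by a staged-pass design: clean all words once, then run one full marking pass per category over a mutable tag array (organizations, then locations, then persons, so later passes overwrite and persons take precedence), then zip-and-filter the tagged words.
import Mathlib
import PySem

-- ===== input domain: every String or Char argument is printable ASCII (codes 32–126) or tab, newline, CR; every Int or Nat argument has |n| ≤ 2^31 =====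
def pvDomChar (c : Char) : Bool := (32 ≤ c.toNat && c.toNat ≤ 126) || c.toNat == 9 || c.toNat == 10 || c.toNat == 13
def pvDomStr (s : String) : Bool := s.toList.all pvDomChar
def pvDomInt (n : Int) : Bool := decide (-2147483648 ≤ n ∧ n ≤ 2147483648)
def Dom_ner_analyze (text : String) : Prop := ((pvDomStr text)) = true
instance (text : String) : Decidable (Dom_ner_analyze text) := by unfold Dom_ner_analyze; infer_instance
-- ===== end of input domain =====

-- B replaces A's single pass with a per-word elif chain by staged passes: clean all words once,
-- then one full marking pass per category over a tag array (lowest priority first, so a later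
-- category overwrites), then a final zip-and-filter. Alternative decomposition, same cost class.

-- ===== PORT A =====
def pvPersons : List String := ["Ali", "Elon", "Musk", "Putin", "Trump", "Biden", "Steve", "Jobs",
  "Zilola", "Sardor", "Bahrom", "Mirobidjon", "Karimov", "Mirziyoyev"]

def pvLocations : List String := ["Toshkent", "Samarqand", "Buxoro", "London", "New York", "Tokyo",
  "Moscow", "Berlin", "Paris", "Uzbekistan", "America", "Japan", "O'zbekiston"]

def pvOrganizations : List String := ["Google", "Apple", "Tesla", "Microsoft", "Samsung", "OpenAI",
  "Facebook", "Meta", "Amazon", "NASA", "UN", "FIFA"]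

-- A's for-loop over the words, branches in the Python's order
def pvLoopA : List String → List (String × String)
  | [] => []
  | word :: ws =>
    let clean := PySem.Str.stripChars word ".,!?;:'\"()[]"
    if clean ∈ pvPersons then (clean, "SHAXS") :: pvLoopA ws
    else if clean ∈ pvLocations then (clean, "JOY") :: pvLoopA ws
    else if clean ∈ pvOrganizations then (clean, "TASHKILOT") :: pvLoopA ws
    else pvLoopA ws

def ner_analyze (text : String) : List (String × String) :=
  pvLoopA (PySem.Str.split₀ text)

-- ===== PORT B =====
-- one marking pass: 'for i, c in enumerate(cleans): if c in name_set: tags[i] = tag'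
def pvMark (names : PySem.Set String) (tag : String) :
    List String → List (Option String) → List (Option String)
  | c :: cs, t :: ts => (if c ∈ names then some tag else t) :: pvMark names tag cs ts
  | _, ts => ts

-- '[(c, t) for c, t in zip(cleans, tags) if t is not None]'
def pvZipFilter (cs : List String) (ts : List (Option String)) : List (String × String) :=
  (cs.zip ts).filterMap (fun p => match p.2 with | some tag => some (p.1, tag) | none => none)

def ner_analyze_alt (text : String) : List (String × String) :=
  let cleans := (PySem.Str.split₀ text).map (fun w => PySem.Str.stripChars w ".,!?;:'\"()[]")
  let tags0 : List (Option String) := cleans.map (fun _ => none)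
  let t1 := pvMark (PySem.Set.ofList pvOrganizations) "TASHKILOT" cleans tags0
  let t2 := pvMark (PySem.Set.ofList pvLocations) "JOY" cleans t1
  let t3 := pvMark (PySem.Set.ofList pvPersons) "SHAXS" cleans t2
  pvZipFilter cleans t3

-- ===== PRECONDITION & SPEC =====
def Spec_ner_analyze (text : String) (out : List (String × String)) : Prop := out = ner_analyze_alt text
instance (text : String) (out : List (String × String)) : Decidable (Spec_ner_analyze text out) := by unfold Spec_ner_analyze; infer_instance

-- ===== CLAIM (what is proved, stated in full; the proofs are below) =====
def Claim_equal_ner_analyze : Prop := ∀ (text : String), Dom_ner_analyze text → Spec_ner_analyze text (ner_analyze text)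

-- ===== LEMMAS AND PROOFS =====

-- the whole B pipeline, as a function of the cleaned word list
def pvPipeline (cs : List String) : List (String × String) :=
  pvZipFilter cs
    (pvMark (PySem.Set.ofList pvPersons) "SHAXS" cs
      (pvMark (PySem.Set.ofList pvLocations) "JOY" cs
        (pvMark (PySem.Set.ofList pvOrganizations) "TASHKILOT" cs
          (cs.map (fun _ => none)))))

-- the staged overwrite passes produce, per word, exactly A's elif decision
theorem pvPipeline_eq (ws : List String) :
    pvLoopA ws = pvPipeline (ws.map (fun w => PySem.Str.stripChars w ".,!?;:'\"()[]")) := by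
  induction ws with
  | nil => rfl
  | cons w ws ih =>
    simp only [List.map_cons, pvPipeline, pvMark, pvZipFilter, List.zip_cons_cons,
      List.filterMap_cons, pvLoopA, PySem.Set.mem_ofList] at *
    split_ifs <;> simp_all [pvPipeline]

-- ===== VERDICT (by name: the statement is the Claim_ definition above) =====
theorem ner_analyze_spec : Claim_equal_ner_analyze := by
  intro text _
  unfold Spec_ner_analyze ner_analyze ner_analyze_alt
  exact pvPipeline_eq _
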